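-- pv_equiv track=rewrite | github.com/luokailun/synthesizer | formula/predicate.py | __recolour
-- ===== SOURCE A (Python) =====
-- def __recolour(mtuple, colors,var):
-- 	n = 0
-- 	mdict = dict()
-- 	mlist = list()
-- 	for e,elem in enumerate(mtuple):
-- 		if elem in mdict.keys():
-- 			mlist.append(var+str(mdict[elem]))
-- 		else:
-- 			mlist.append(var+str(colors[n]))
-- 			mdict[elem] = colors[n]
-- 			n+=1
-- 	return tuple(mlist)
-- ===== SOURCE B (Python) =====
-- def __recolour(mtuple, colors, var):
--     # Dict-free: the colour index of each element is the number of distinct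
--     # elements strictly before its first occurrence in mtuple.
--     return tuple(var + str(colors[len(set(mtuple[:mtuple.index(e)]))])
--                  for e in mtuple)
-- ===== Notes on version B (the rewrite author's own statement) =====
-- stated objective: alternative
-- what changed: Removes the dict and counter entirely: instead of incrementally assigning colours in one stateful pass, B computes each element's colour index directly as the number of distinct elements before its first occurrence (len(set(mtuple[:mtuple.index(e)]))), trading O(n) incremental bookkeeping for a stateless per-element recomputation.
import Mathlib
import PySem

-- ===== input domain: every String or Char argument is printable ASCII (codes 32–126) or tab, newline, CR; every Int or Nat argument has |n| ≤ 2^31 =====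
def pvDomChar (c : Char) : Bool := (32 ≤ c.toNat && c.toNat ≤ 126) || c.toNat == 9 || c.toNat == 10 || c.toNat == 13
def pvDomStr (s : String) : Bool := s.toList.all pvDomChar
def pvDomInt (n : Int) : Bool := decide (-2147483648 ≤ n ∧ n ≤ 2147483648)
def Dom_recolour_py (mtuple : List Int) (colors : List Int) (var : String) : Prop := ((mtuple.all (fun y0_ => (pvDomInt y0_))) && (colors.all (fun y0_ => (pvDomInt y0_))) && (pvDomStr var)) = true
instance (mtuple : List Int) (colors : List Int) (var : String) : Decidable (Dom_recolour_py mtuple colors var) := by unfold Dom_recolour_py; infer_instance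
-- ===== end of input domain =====

-- B removes A's dict and running counter entirely: each element's colour index is recomputed
-- directly as the number of distinct elements before its first occurrence (objective: alternative).


-- ===== PORT A =====
-- literal port of A's loop: state (n, mdict, mlist); colors[n] is PySem.List.pyGet?,
-- whose '.getD 0' never fires inside Pre_ (there n < colors.length, so the lookup is some _).
def recolour_py (mtuple : List Int) (colors : List Int) (var : String) : List String :=
  (mtuple.foldl
    (fun (st : Int × PySem.Dict Int Int × List String) elem =>
      if st.2.1.contains elem then
        (st.1, st.2.1, st.2.2 ++ [var ++ PySem.Int.toStr (st.2.1.getD elem 0)])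
      else
        (st.1 + 1,
         st.2.1.insert elem ((PySem.List.pyGet? colors st.1).getD 0),
         st.2.2 ++ [var ++ PySem.Int.toStr ((PySem.List.pyGet? colors st.1).getD 0)]))
    (0, PySem.Dict.empty, [])).2.2

-- ===== PORT B =====
-- literal port of Source B: one comprehension over mtuple; per element e, mtuple.index(e) is
-- PySem.List.index? (always some _ since e ∈ mtuple, the '.getD 0' never fires),
-- mtuple[:j] is PySem.List.slice, set(...) is PySem.Set.ofList, len is PySem.Set.len.
def recolour_py_alt (mtuple : List Int) (colors : List Int) (var : String) : List String :=
  mtuple.map (fun e =>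
    var ++ PySem.Int.toStr
      ((PySem.List.pyGet? colors
        (PySem.Set.len (PySem.Set.ofList
          (PySem.List.slice mtuple none
            (some (((PySem.List.index? mtuple e).getD 0 : Nat) : Int)))))).getD 0))

-- ===== PRECONDITION & SPEC =====
-- Pre_ excludes exactly the inputs on which A raises IndexError: when mtuple has more
-- distinct elements than colors has entries, colors[n] goes out of range (B raises there too).
def Pre_recolour_py (mtuple : List Int) (colors : List Int) (var : String) : Prop :=
  (PySem.List.dedup mtuple).length ≤ colors.length
instance (mtuple : List Int) (colors : List Int) (var : String) : Decidable (Pre_recolour_py mtuple colors var) := by unfold Pre_recolour_py; infer_instance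
def pvWitness_recolour_py : List Int × List Int × String := ([1, 2, 1], [5, 7], "x")

def Spec_recolour_py (mtuple : List Int) (colors : List Int) (var : String) (out : List String) : Prop := out = recolour_py_alt mtuple colors var
instance (mtuple : List Int) (colors : List Int) (var : String) (out : List String) : Decidable (Spec_recolour_py mtuple colors var out) := by unfold Spec_recolour_py; infer_instance

-- ===== CLAIM (what is proved, stated in full; the proofs are below) =====
def Claim_equal_recolour_py : Prop := ∀ (mtuple : List Int) (colors : List Int) (var : String), Dom_recolour_py mtuple colors var → Pre_recolour_py mtuple colors var → Spec_recolour_py mtuple colors var (recolour_py mtuple colors var)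

-- ===== LEMMAS AND PROOFS =====

-- The canonical colour table realised by A's loop: each first-occurrence-distinct element of p
-- mapped to the colour at its dedup index.
def pvM (colors : List Int) (p : List Int) : PySem.Dict Int Int :=
  (PySem.List.enumerate (PySem.List.dedup p)).foldl
    (fun (d : PySem.Dict Int Int) q => d.insert q.2 ((PySem.List.pyGet? colors q.1).getD 0))
    PySem.Dict.empty

theorem pvM_items (colors p : List Int) :
    (pvM colors p).items =
      (PySem.List.enumerate (PySem.List.dedup p)).map
        (fun q => (q.2, (PySem.List.pyGet? colors q.1).getD 0)) := by
  have h := PySem.Dict.items_foldl_insert_fresh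
      (PySem.List.enumerate (PySem.List.dedup p)) (fun q => q.2)
      (fun q => (PySem.List.pyGet? colors q.1).getD 0) PySem.Dict.empty
      (fun a _ => PySem.Dict.contains_empty _)
      (by rw [PySem.List.map_snd_enumerate]; exact PySem.List.nodup_dedup p)
  simpa [pvM] using h

theorem pvM_keys (colors p : List Int) : (pvM colors p).keys = PySem.List.dedup p := by
  show (pvM colors p).items.map (·.1) = _
  rw [pvM_items, List.map_map]
  exact PySem.List.map_snd_enumerate _ _

theorem pvM_getD (colors p : List Int) (e : Int) (hm : e ∈ PySem.List.dedup p) :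
    (pvM colors p).getD e 0 =
      (PySem.List.pyGet? colors ((List.idxOf e (PySem.List.dedup p) : Nat) : Int)).getD 0 := by
  apply PySem.Dict.getD_of_mem_items
  · rw [pvM_items, List.mem_map]
    refine ⟨(((List.idxOf e (PySem.List.dedup p) : Nat) : Int), e), ?_, ?_⟩
    · rw [PySem.List.mem_enumerate_iff]
      exact ⟨List.idxOf e (PySem.List.dedup p), List.idxOf_lt_length_of_mem hm, by simp⟩
    · simp
  · rw [pvM_keys]; exact PySem.List.nodup_dedup p

theorem dedup_append_mem (p : List Int) (x : Int) (h : x ∈ p) :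
    PySem.List.dedup (p ++ [x]) = PySem.List.dedup p := by
  simp only [PySem.List.dedup_eq_ofList, PySem.Set.ofList_eq_foldl, List.foldl_append,
    List.foldl_cons, List.foldl_nil]
  show PySem.Set.add _ x = _
  rw [PySem.Set.add]
  simp [PySem.Set.contains, ← PySem.Set.ofList_eq_foldl, PySem.Set.mem_ofList, h]

theorem dedup_append_not_mem (p : List Int) (x : Int) (h : x ∉ p) :
    PySem.List.dedup (p ++ [x]) = PySem.List.dedup p ++ [x] := by
  simp only [PySem.List.dedup_eq_ofList, PySem.Set.ofList_eq_foldl, List.foldl_append,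
    List.foldl_cons, List.foldl_nil]
  show PySem.Set.add _ x = _
  rw [PySem.Set.add]
  simp [PySem.Set.contains, ← PySem.Set.ofList_eq_foldl, PySem.Set.mem_ofList, h]

theorem dedup_prefix (p l : List Int) :
    ∃ t, PySem.List.dedup (p ++ l) = PySem.List.dedup p ++ t := by
  simp only [PySem.List.dedup_eq_ofList, PySem.Set.ofList_eq_foldl, List.foldl_append]
  generalize (List.foldl PySem.Set.add [] p) = s
  induction l generalizing s with
  | nil => exact ⟨[], by simp⟩
  | cons x l ih =>
    simp only [List.foldl_cons]
    rcases ih (PySem.Set.add s x) with ⟨t, ht⟩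
    by_cases h : x ∈ s
    · exact ⟨t, by simpa [PySem.Set.add, h] using ht⟩
    · exact ⟨x :: t, by simpa [PySem.Set.add, h] using ht⟩

theorem idxOf_append_self (x : Int) (s : List Int) (h : x ∉ s) :
    List.idxOf x (s ++ [x]) = s.length := by
  induction s with
  | nil => simp
  | cons a s ih =>
    have hne : (a == x) = false := by simp; intro he; exact h (by simp [he])
    simp only [List.cons_append, List.idxOf, List.findIdx_cons, hne, cond_false]
    have := ih (fun hm => h (List.mem_cons_of_mem _ hm))
    simp only [List.idxOf] at this
    simp [this]

theorem pvM_step_not_mem (colors p : List Int) (x : Int) (h : x ∉ p) :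
    pvM colors (p ++ [x]) =
      (pvM colors p).insert x
        ((PySem.List.pyGet? colors ((PySem.List.dedup p).length : Int)).getD 0) := by
  unfold pvM
  rw [dedup_append_not_mem p x h, PySem.List.enumerate_append, List.foldl_append]
  simp [PySem.List.enumerate]

theorem pvM_contains (colors p : List Int) (x : Int) :
    (pvM colors p).contains x = true ↔ x ∈ p := by
  rw [PySem.Dict.contains_iff_mem_keys, pvM_keys, PySem.List.mem_dedup]

-- A's loop invariant: from the state reached after a prefix p, the loop over l appends
-- exactly the table values for l (colour indices taken in dedup (p ++ l)).
theorem loopA (colors : List Int) (var : String) :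
    ∀ (l p : List Int) (acc : List String),
    (l.foldl
      (fun (st : Int × PySem.Dict Int Int × List String) elem =>
        if st.2.1.contains elem then
          (st.1, st.2.1, st.2.2 ++ [var ++ PySem.Int.toStr (st.2.1.getD elem 0)])
        else
          (st.1 + 1,
           st.2.1.insert elem ((PySem.List.pyGet? colors st.1).getD 0),
           st.2.2 ++ [var ++ PySem.Int.toStr ((PySem.List.pyGet? colors st.1).getD 0)]))
      ((((PySem.List.dedup p).length : Nat) : Int), pvM colors p, acc)).2.2
    = acc ++ l.map (fun e => var ++ PySem.Int.toStr ((pvM colors (p ++ l)).getD e 0)) := by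
  intro l
  induction l with
  | nil => intro p acc; simp
  | cons x l ih =>
    intro p acc
    simp only [List.foldl_cons, List.map_cons]
    by_cases hx : x ∈ p
    · have hc : (pvM colors p).contains x = true := (pvM_contains colors p x).mpr hx
      rw [if_pos hc]
      have hd : PySem.List.dedup (p ++ [x]) = PySem.List.dedup p := dedup_append_mem p x hx
      have hstate := ih (p ++ [x]) (acc ++ [var ++ PySem.Int.toStr ((pvM colors p).getD x 0)])
      rw [hd] at hstate
      have hM : pvM colors (p ++ [x]) = pvM colors p := by unfold pvM; rw [hd]
      rw [hM] at hstate
      rw [hstate, List.append_assoc, List.append_assoc]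
      congr 1
      simp only [List.singleton_append]
      rcases dedup_prefix p (x :: l) with ⟨t, ht⟩
      have hmx : x ∈ PySem.List.dedup p := (PySem.List.mem_dedup p x).mpr hx
      have hmfull : x ∈ PySem.List.dedup (p ++ x :: l) := by
        rw [ht]; exact List.mem_append_left _ hmx
      rw [pvM_getD colors p x hmx, pvM_getD colors (p ++ x :: l) x hmfull, ht,
        List.idxOf_append_of_mem hmx]
    · have hc : (pvM colors p).contains x = false := by
        rw [← Bool.not_eq_true]; exact fun h => hx ((pvM_contains colors p x).mp h)
      rw [if_neg (by simp [hc])]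
      have hd : PySem.List.dedup (p ++ [x]) = PySem.List.dedup p ++ [x] :=
        dedup_append_not_mem p x hx
      have hM := pvM_step_not_mem colors p x hx
      have hlen : (((PySem.List.dedup (p ++ [x])).length : Nat) : Int)
          = (((PySem.List.dedup p).length : Nat) : Int) + 1 := by
        rw [hd]; simp
      have hstate := ih (p ++ [x])
        (acc ++ [var ++ PySem.Int.toStr ((PySem.List.pyGet? colors ((PySem.List.dedup p).length : Int)).getD 0)])
      rw [hlen, hM] at hstate
      rw [hstate, List.append_assoc, List.append_assoc]
      congr 1
      simp only [List.singleton_append]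
      rcases dedup_prefix (p ++ [x]) l with ⟨t, ht⟩
      rw [List.append_assoc, List.singleton_append, hd] at ht
      have hmx : x ∈ PySem.List.dedup p ++ [x] := List.mem_append_right _ (by simp)
      have hmfull : x ∈ PySem.List.dedup (p ++ x :: l) := by
        rw [ht]; exact List.mem_append_left _ hmx
      rw [pvM_getD colors (p ++ x :: l) x hmfull, ht, List.idxOf_append_of_mem hmx,
        idxOf_append_self x _ (fun h => hx ((PySem.List.mem_dedup p x).mp h))]

theorem recolour_py_eq_map (mtuple colors : List Int) (var : String) :
    recolour_py mtuple colors var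
      = mtuple.map (fun e => var ++ PySem.Int.toStr ((pvM colors mtuple).getD e 0)) := by
  have h := loopA colors var mtuple [] []
  simpa [recolour_py, pvM, PySem.List.dedup_eq_ofList, PySem.Set.ofList_eq_foldl,
    PySem.List.enumerate] using h

-- The bridge to B: first-occurrence decomposition mtuple = pre ++ e :: suf with e ∉ pre;
-- then the dedup index of e is (dedup pre).length.
theorem recolour_py_alt_eq_map (mtuple colors : List Int) (var : String) :
    recolour_py_alt mtuple colors var
      = mtuple.map (fun e => var ++ PySem.Int.toStr ((pvM colors mtuple).getD e 0)) := by
  unfold recolour_py_alt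
  apply List.map_congr_left
  intro e he
  obtain ⟨k, hk⟩ := Option.isSome_iff_exists.mp
    ((PySem.List.index?_isSome_iff (xs := mtuple) (v := e)).mpr he)
  obtain ⟨pre, suf, hsplit, hlen, hnpre⟩ := (PySem.List.index?_eq_some_iff mtuple e k).mp hk
  have htake : mtuple.take k = pre := by
    rw [hsplit, ← hlen]; simp
  have hntd : e ∉ PySem.List.dedup pre := fun h => hnpre ((PySem.List.mem_dedup _ e).mp h)
  have hidx : List.idxOf e (PySem.List.dedup mtuple) = (PySem.List.dedup pre).length := by
    have hsplit2 : mtuple = (pre ++ [e]) ++ suf := by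
      rw [hsplit]; simp
    rcases dedup_prefix (pre ++ [e]) suf with ⟨t, ht⟩
    rw [← hsplit2] at ht
    rw [ht, dedup_append_not_mem _ e hnpre,
      List.idxOf_append_of_mem (List.mem_append_right _ (by simp)),
      idxOf_append_self e _ hntd]
  have hsetlen : PySem.Set.len (PySem.Set.ofList (mtuple.take k))
      = ((PySem.List.dedup pre).length : Int) := by
    rw [htake]; simp [PySem.Set.len, PySem.List.dedup_eq_ofList]
  congr 1
  congr 1
  rw [hk]
  simp only [Option.getD_some, PySem.List.slice_to_natCast, hsetlen]
  rw [pvM_getD colors mtuple e ((PySem.List.mem_dedup _ e).mpr he), hidx]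

-- ===== VERDICT (by name: the statement is the Claim_ definition above) =====
theorem recolour_py_spec : Claim_equal_recolour_py := by
  intro mtuple colors var _ _
  unfold Spec_recolour_py
  rw [recolour_py_eq_map, recolour_py_alt_eq_map]
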